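-- pv_equiv track=rewrite | github.com/MarcinZmuda/Brajn | src/article_pipeline/variables.py | _calc_target_length
-- ===== SOURCE A (Python) =====
-- def _calc_target_length(serp, default=2000):
--     """Return competitor-based target length (no minimum floor)."""
--     word_counts = sorted([
--         c.get("word_count") or c.get("words") or 0
--         for c in (serp.get("competitors") or []) if isinstance(c, dict)
--         if (c.get("word_count") or c.get("words") or 0) > 200
--     ])
--     if not word_counts:
--         return default
--     mid = len(word_counts) // 2
--     median = (word_counts[mid] if len(word_counts) % 2 == 1
--               else (word_counts[mid-1] + word_counts[mid]) // 2)
--     return median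
-- ===== SOURCE B (Python) =====
-- def _calc_target_length(serp, default=2000):
--     """Return competitor-based target length (no minimum floor)."""
--     counts = [
--         c.get("word_count") or c.get("words") or 0
--         for c in (serp.get("competitors") or []) if isinstance(c, dict)
--         if (c.get("word_count") or c.get("words") or 0) > 200
--     ]
--     if not counts:
--         return default
--     n = len(counts)
--     if n % 2 == 1:
--         return _quickselect(counts, n // 2)
--     return (_quickselect(counts, n // 2 - 1) + _quickselect(counts, n // 2)) // 2
--
--
-- def _quickselect(xs, k):
--     """k-th smallest element of xs (0-based), by three-way partitioning."""
--     while True: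
--         p = xs[0]
--         lows = [x for x in xs if x < p]
--         highs = [x for x in xs if x > p]
--         if k < len(lows):
--             xs = lows
--         elif k < len(xs) - len(highs):
--             return p
--         else:
--             k -= len(xs) - len(highs)
--             xs = highs
-- ===== Notes on version B (the rewrite author's own statement) =====
-- stated objective: alternative
-- what changed: B replaces the full sort of qualifying word counts by a three-way-partition quickselect that extracts only the one or two middle order statistics.
import Mathlib
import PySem

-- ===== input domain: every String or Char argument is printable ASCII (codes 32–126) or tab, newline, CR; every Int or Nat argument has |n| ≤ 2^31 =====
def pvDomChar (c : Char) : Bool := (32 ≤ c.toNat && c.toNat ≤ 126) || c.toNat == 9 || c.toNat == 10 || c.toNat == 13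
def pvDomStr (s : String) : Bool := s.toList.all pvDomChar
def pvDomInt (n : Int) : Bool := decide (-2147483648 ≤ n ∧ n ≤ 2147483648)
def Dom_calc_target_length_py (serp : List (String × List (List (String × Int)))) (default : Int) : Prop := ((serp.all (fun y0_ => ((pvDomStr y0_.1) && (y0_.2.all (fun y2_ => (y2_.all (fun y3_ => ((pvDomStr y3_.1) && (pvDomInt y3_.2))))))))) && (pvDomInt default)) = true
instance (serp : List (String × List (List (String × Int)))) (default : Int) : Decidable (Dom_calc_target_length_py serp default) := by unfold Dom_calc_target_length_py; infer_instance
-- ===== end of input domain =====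

-- B replaces A's full sort of the qualifying word counts by a three-way-partition
-- quickselect extracting only the middle order statistic(s); objective: alternative algorithm.

-- `x or y` on Python ints / None: first truthy value (0 and None are falsy)
def pvOrInt (o : Option Int) (e : Int) : Int :=
  match o with
  | some v => if v = 0 then e else v
  | none => e

-- c.get("word_count") or c.get("words") or 0
def pvWC (c : List (String × Int)) : Int :=
  pvOrInt ((PySem.Dict.mk c).get? "word_count") (pvOrInt ((PySem.Dict.mk c).get? "words") 0)

-- ===== PORT A =====
def calc_target_length_py (serp : List (String × List (List (String × Int)))) (default : Int) : Int :=
  -- `serp.get("competitors") or []` : None → []; isinstance(c, dict) is always true here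
  let comps := ((PySem.Dict.mk serp).get? "competitors").getD []
  let word_counts :=
    PySem.List.sorted ((comps.filter (fun c => 200 < pvWC c)).map pvWC) (fun x => x) false
  if word_counts = [] then default
  else
    let mid := PySem.Int.floordiv (word_counts.length : Int) 2
    if PySem.Int.mod (word_counts.length : Int) 2 = 1 then
      -- index always in range (mid < len), so the IndexError default is never used
      (PySem.List.pyGet? word_counts mid).getD 0
    else
      PySem.Int.floordiv
        (((PySem.List.pyGet? word_counts (mid - 1)).getD 0)
          + ((PySem.List.pyGet? word_counts mid).getD 0)) 2

-- ===== PORT B =====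
-- _quickselect: k-th smallest (0-based) by three-way partitioning; 0 stands for the
-- unreachable IndexError on the empty list (only called with 0 ≤ k < len)
def pvQuickselect : List Int → Int → Int
  | [], _ => 0
  | p :: t, k =>
    let xs := p :: t
    let lows := xs.filter (fun x => decide (x < p))
    let highs := xs.filter (fun x => decide (p < x))
    if k < (lows.length : Int) then pvQuickselect lows k
    else if k < (xs.length : Int) - (highs.length : Int) then p
    else pvQuickselect highs (k - ((xs.length : Int) - (highs.length : Int)))
termination_by xs _ => xs.length
decreasing_by
  · simpa using Nat.lt_succ_of_le (List.length_filter_le _ t)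
  · simpa using Nat.lt_succ_of_le (List.length_filter_le _ t)

def calc_target_length_py_alt (serp : List (String × List (List (String × Int)))) (default : Int) : Int :=
  let comps := ((PySem.Dict.mk serp).get? "competitors").getD []
  let counts := (comps.filter (fun c => 200 < pvWC c)).map pvWC
  if counts = [] then default
  else
    let n : Int := counts.length
    if PySem.Int.mod n 2 = 1 then pvQuickselect counts (PySem.Int.floordiv n 2)
    else
      PySem.Int.floordiv
        (pvQuickselect counts (PySem.Int.floordiv n 2 - 1)
          + pvQuickselect counts (PySem.Int.floordiv n 2)) 2

-- ===== PRECONDITION & SPEC =====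
def Spec_calc_target_length_py (serp : List (String × List (List (String × Int)))) (default : Int) (out : Int) : Prop := out = calc_target_length_py_alt serp default
instance (serp : List (String × List (List (String × Int)))) (default : Int) (out : Int) : Decidable (Spec_calc_target_length_py serp default out) := by unfold Spec_calc_target_length_py; infer_instance

-- ===== CLAIM (what is proved, stated in full; the proofs are below) =====
def Claim_equal_calc_target_length_py : Prop := ∀ (serp : List (String × List (List (String × Int)))) (default : Int), Dom_calc_target_length_py serp default → Spec_calc_target_length_py serp default (calc_target_length_py serp default)

-- ===== LEMMAS AND PROOFS =====

theorem pvQuickselect_eq_sorted :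
    ∀ (n : Nat) (xs : List Int), xs.length ≤ n → ∀ (k : Int), 0 ≤ k → k < (xs.length : Int) →
      pvQuickselect xs k
        = (PySem.List.sorted xs (fun x => x) false).getD k.toNat 0 := by
  intro n
  induction n with
  | zero =>
    intro xs hle k hk0 hk
    omega
  | succ n ih =>
    intro xs hle k hk0 hk
    match xs with
    | [] => simp at hk; omega
    | p :: t =>
      -- the three-way partition
      set lows := (p :: t).filter (fun x => decide (x < p)) with hlows
      set eqs := (p :: t).filter (fun x => decide (x = p)) with heqs
      set highs := (p :: t).filter (fun x => decide (p < x)) with hhighs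
      have hmem_lows : ∀ x ∈ lows, x < p := by
        intro x hx; rw [hlows, List.mem_filter] at hx; simpa using hx.2
      have hmem_eqs : ∀ x ∈ eqs, x = p := by
        intro x hx; rw [heqs, List.mem_filter] at hx; simpa using hx.2
      have hmem_highs : ∀ x ∈ highs, p < x := by
        intro x hx; rw [hhighs, List.mem_filter] at hx; simpa using hx.2
      -- permutation decomposition
      have h1 := List.filter_append_perm (fun x => decide (x < p)) (p :: t)
      have h2 := List.filter_append_perm (fun x => decide (x = p))
        ((p :: t).filter (fun x => !decide (x < p)))
      have e1 : ((p :: t).filter (fun x => !decide (x < p))).filter (fun x => decide (x = p)) = eqs := by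
        rw [List.filter_filter, heqs]
        apply List.filter_congr
        intro x _
        by_cases h : x = p <;> simp [h]
      have e2 : ((p :: t).filter (fun x => !decide (x < p))).filter (fun x => !decide (x = p)) = highs := by
        rw [List.filter_filter, hhighs]
        apply List.filter_congr
        intro x _
        by_cases h1 : x = p
        · simp [h1]
        · by_cases h2 : p < x <;> simp [h1, h2] <;> omega
      rw [e1, e2] at h2
      have hA : (lows ++ (eqs ++ highs)).Perm (p :: t) :=
        ((h2.append_left lows).trans h1)
      have hlen := hA.length_eq
      simp only [List.length_append, List.length_cons] at hlen
      -- the sorted list splits at the pivot block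
      have hsplit : PySem.List.sorted (p :: t) (fun x => x) false
          = PySem.List.sorted lows (fun x => x) false ++ (eqs ++ PySem.List.sorted highs (fun x => x) false) := by
        apply PySem.List.sorted_id_eq_of_perm_of_pairwise
        · exact (((PySem.List.sorted_perm lows (fun x => x) false).append
            ((List.Perm.refl eqs).append (PySem.List.sorted_perm highs (fun x => x) false))).trans hA)
        · rw [List.pairwise_append]
          refine ⟨?_, ?_, ?_⟩
          · simpa using PySem.List.sorted_pairwise lows (fun x => x)
          · rw [List.pairwise_append]
            refine ⟨?_, ?_, ?_⟩
            · exact List.pairwise_of_forall_mem_list (fun a ha b hb => by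
                rw [hmem_eqs a ha, hmem_eqs b hb])
            · simpa using PySem.List.sorted_pairwise highs (fun x => x)
            · intro a ha b hb
              have hb' := hmem_highs b ((PySem.List.mem_sorted _ _ _ _).1 hb)
              rw [hmem_eqs a ha]; omega
          · intro a ha b hb
            have ha' := hmem_lows a ((PySem.List.mem_sorted _ _ _ _).1 ha)
            rcases List.mem_append.1 hb with hb | hb
            · rw [hmem_eqs b hb]; omega
            · have := hmem_highs b ((PySem.List.mem_sorted _ _ _ _).1 hb); omega
      have hL : (PySem.List.sorted lows (fun x => x) false).length = lows.length :=
        PySem.List.length_sorted lows (fun x => x) false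
      -- unfold one step of quickselect
      rw [pvQuickselect]
      by_cases c1 : k < (lows.length : Int)
      · rw [if_pos c1]
        have hlt : lows.length < (p :: t).length := by
          rw [hlows]
          simpa using Nat.lt_succ_of_le (List.length_filter_le _ t)
        have := ih lows (by omega) k hk0 (by omega)
        rw [this, hsplit, List.getD_append]
        omega
      · rw [if_neg c1]
        simp only [List.length_cons] at *
        by_cases c2 : k < ((t.length + 1 : Nat) : Int) - (highs.length : Int)
        · rw [if_pos c2]
          rw [hsplit, List.getD_append_right _ _ _ _ (by omega), List.getD_append _ _ _ _ (by omega)]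
          have hj : k.toNat - (PySem.List.sorted lows (fun x => x) false).length < eqs.length := by omega
          rw [List.getD_eq_getElem _ _ hj]
          exact (hmem_eqs _ (List.getElem_mem hj)).symm
        · rw [if_neg c2]
          have hlt : highs.length < t.length + 1 := by
            rw [hhighs]
            simpa using Nat.lt_succ_of_le (List.length_filter_le _ t)
          have hk0' : 0 ≤ k - (((t.length + 1 : Nat) : Int) - (highs.length : Int)) := by
            push_cast at c2 ⊢; omega
          have hk' : k - (((t.length + 1 : Nat) : Int) - (highs.length : Int)) < (highs.length : Int) := by
            push_cast at hk ⊢; omega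
          have := ih highs (by omega) _ hk0' hk'
          rw [this, hsplit, List.getD_append_right _ _ _ _ (by omega),
            List.getD_append_right _ _ _ _ (by omega)]
          congr 1
          push_cast at c2
          omega

-- the median computation itself: A's sort-and-index equals B's two quickselects
theorem pv_median_eq (ws : List Int) (default : Int) :
    (let word_counts := PySem.List.sorted ws (fun x => x) false
     if word_counts = [] then default
     else
       let mid := PySem.Int.floordiv (word_counts.length : Int) 2
       if PySem.Int.mod (word_counts.length : Int) 2 = 1 then
         (PySem.List.pyGet? word_counts mid).getD 0
       else
         PySem.Int.floordiv
           (((PySem.List.pyGet? word_counts (mid - 1)).getD 0)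
             + ((PySem.List.pyGet? word_counts mid).getD 0)) 2)
    = (if ws = [] then default
       else
         let n : Int := ws.length
         if PySem.Int.mod n 2 = 1 then pvQuickselect ws (PySem.Int.floordiv n 2)
         else
           PySem.Int.floordiv
             (pvQuickselect ws (PySem.Int.floordiv n 2 - 1)
               + pvQuickselect ws (PySem.Int.floordiv n 2)) 2) := by
  by_cases hnil : ws = []
  · simp [hnil, PySem.List.sorted_eq_nil_iff]
  · have hsn : PySem.List.sorted ws (fun x => x) false ≠ [] := by
      rw [Ne, PySem.List.sorted_eq_nil_iff]; exact hnil
    have hlen : (PySem.List.sorted ws (fun x => x) false).length = ws.length :=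
      PySem.List.length_sorted ws (fun x => x) false
    have hpos : 0 < ws.length := List.length_pos_iff.2 hnil
    have hmid : PySem.Int.floordiv ((ws.length : Nat) : Int) 2 = ((ws.length / 2 : Nat) : Int) := by
      exact_mod_cast PySem.Int.floordiv_natCast ws.length 2
    have hmod : PySem.Int.mod ((ws.length : Nat) : Int) 2 = ((ws.length % 2 : Nat) : Int) := by
      exact_mod_cast PySem.Int.mod_natCast ws.length 2
    simp only [hnil, hsn, hlen, hmid, hmod]
    have hsel : ∀ (j : Nat), j < ws.length →
        pvQuickselect ws ((j : Nat) : Int)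
          = ((PySem.List.sorted ws (fun x => x) false)[(j : Nat)]?).getD 0 := by
      intro j hj
      rw [pvQuickselect_eq_sorted ws.length ws le_rfl ((j : Nat) : Int) (by omega) (by exact_mod_cast hj)]
      rw [List.getD_eq_getElem?_getD]
      simp
    by_cases hodd : ((ws.length % 2 : Nat) : Int) = 1
    · rw [if_pos hodd, if_pos hodd]
      rw [PySem.List.pyGet?_natCast, hsel (ws.length / 2) (by omega)]
    · rw [if_neg hodd, if_neg hodd]
      have hne1 : ws.length % 2 ≠ 1 := by
        intro h; exact hodd (by rw [h]; rfl)
      have h2 : 2 ≤ ws.length := by omega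
      have hc : ((ws.length / 2 : Nat) : Int) - 1 = ((ws.length / 2 - 1 : Nat) : Int) := by
        have : 1 ≤ ws.length / 2 := by omega
        push_cast [this]; omega
      rw [hc, PySem.List.pyGet?_natCast, PySem.List.pyGet?_natCast]
      rw [hsel (ws.length / 2 - 1) (by omega), hsel (ws.length / 2) (by omega)]

theorem calc_target_length_py_spec : Claim_equal_calc_target_length_py := by
  intro serp default _hdom
  unfold Spec_calc_target_length_py calc_target_length_py calc_target_length_py_alt
  exact pv_median_eq _ default
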